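-- pv_equiv track=rewrite | github.com/QuentinDuval/PythonExperiments | graphs/CutOffTreeForGolfEvent_Hard.py | sort_by_height
-- ===== SOURCE A (Python) =====
-- def sort_by_height(forest, h, w):
--     to_cut = []
--     for i in range(h):
--         for j in range(w):
--             if forest[i][j] > 1:
--                 to_cut.append((i, j))
--     to_cut.sort(key=lambda p: forest[p[0]][p[1]])
--     return to_cut
-- ===== SOURCE B (Python) =====
-- def sort_by_height(forest, h, w):
--     buckets = {}
--     for i in range(h):
--         for j in range(w):
--             v = forest[i][j]
--             if v > 1:
--                 buckets.setdefault(v, []).append((i, j))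
--     out = []
--     for key in sorted(buckets):
--         out.extend(buckets[key])
--     return out
-- ===== Notes on version B (the rewrite author's own statement) =====
-- stated objective: alternative
-- what changed: Instead of collecting all qualifying cells into one flat list and running a comparison sort on it, B groups cells into a dict of buckets keyed by their height during the row-major scan and concatenates the buckets over the sorted distinct heights; ties keep scan order in both.
import Mathlib
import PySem

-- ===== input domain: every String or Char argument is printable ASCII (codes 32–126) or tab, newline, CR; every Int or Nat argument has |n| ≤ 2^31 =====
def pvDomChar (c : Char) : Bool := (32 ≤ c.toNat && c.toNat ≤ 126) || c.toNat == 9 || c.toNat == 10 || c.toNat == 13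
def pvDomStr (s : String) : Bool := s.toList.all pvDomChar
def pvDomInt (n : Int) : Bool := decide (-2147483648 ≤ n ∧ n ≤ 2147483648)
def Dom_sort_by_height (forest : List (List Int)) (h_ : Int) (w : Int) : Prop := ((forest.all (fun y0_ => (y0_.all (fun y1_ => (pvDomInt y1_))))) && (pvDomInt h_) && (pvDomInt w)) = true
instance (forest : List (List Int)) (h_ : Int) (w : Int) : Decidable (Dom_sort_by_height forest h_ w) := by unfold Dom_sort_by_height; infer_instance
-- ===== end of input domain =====

-- B replaces A's comparison sort of the flat cell list by grouping cells into height-keyed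
-- buckets during the same row-major scan and concatenating the buckets over the sorted
-- distinct heights (objective: alternative algorithm, same result including tie order).

-- ===== PORT A =====
def sort_by_height (forest : List (List Int)) (h_ : Int) (w : Int) : List (Int × Int) :=
  let to_cut : List (Int × Int) :=
    (PySem.List.pyRange 0 h_ 1).foldl (fun acc i =>
      (PySem.List.pyRange 0 w 1).foldl (fun acc j =>
        -- forest[i][j]: in range under Pre_; pyGetD's default is never used there
        if PySem.List.pyGetD (PySem.List.pyGetD forest i []) j 0 > 1 then acc ++ [(i, j)]
        else acc) acc) []
  PySem.List.sorted to_cut (fun p => PySem.List.pyGetD (PySem.List.pyGetD forest p.1 []) p.2 0) false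

-- ===== PORT B =====
def sort_by_height_alt (forest : List (List Int)) (h_ : Int) (w : Int) : List (Int × Int) :=
  let buckets : PySem.Dict Int (List (Int × Int)) :=
    (PySem.List.pyRange 0 h_ 1).foldl (fun d i =>
      (PySem.List.pyRange 0 w 1).foldl (fun d j =>
        let v := PySem.List.pyGetD (PySem.List.pyGetD forest i []) j 0
        -- buckets.setdefault(v, []).append((i, j)) = buckets[v] becomes buckets.get(v, []) + [(i, j)]
        if v > 1 then d.modify v [] (fun b => b ++ [(i, j)]) else d) d) PySem.Dict.empty
  (PySem.List.sorted buckets.keys (fun k => k) false).foldl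
    (fun out k => out ++ buckets.getD k []) []

-- ===== PRECONDITION & SPEC =====
-- Pre_ excludes exactly the inputs where Python A raises IndexError: some visited cell
-- (i < h, j < w, with h > 0 and w > 0) is out of range of forest.
def Pre_sort_by_height (forest : List (List Int)) (h_ : Int) (w : Int) : Prop :=
  w ≤ 0 ∨ (h_ ≤ (forest.length : Int) ∧ ∀ row ∈ forest.take h_.toNat, w ≤ (row.length : Int))
instance (forest : List (List Int)) (h_ : Int) (w : Int) : Decidable (Pre_sort_by_height forest h_ w) := by unfold Pre_sort_by_height; infer_instance

def pvWitness_sort_by_height : List (List Int) × Int × Int := ([[1, 2], [3, 1]], 2, 2)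

def Spec_sort_by_height (forest : List (List Int)) (h_ : Int) (w : Int) (out : List (Int × Int)) : Prop := out = sort_by_height_alt forest h_ w
instance (forest : List (List Int)) (h_ : Int) (w : Int) (out : List (Int × Int)) : Decidable (Spec_sort_by_height forest h_ w out) := by unfold Spec_sort_by_height; infer_instance

-- ===== CLAIM (what is proved, stated in full; the proofs are below) =====
def Claim_equal_sort_by_height : Prop := ∀ (forest : List (List Int)) (h_ : Int) (w : Int), Dom_sort_by_height forest h_ w → Pre_sort_by_height forest h_ w → Spec_sort_by_height forest h_ w (sort_by_height forest h_ w)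

-- ===== LEMMAS AND PROOFS =====

-- The height of a cell p = (i, j).
def pvKey (forest : List (List Int)) (p : Int × Int) : Int :=
  PySem.List.pyGetD (PySem.List.pyGetD forest p.1 []) p.2 0

-- The qualifying cells in row-major scan order.
def pvCells (forest : List (List Int)) (h_ : Int) (w : Int) : List (Int × Int) :=
  (PySem.List.pyRange 0 h_ 1).flatMap (fun i =>
    ((PySem.List.pyRange 0 w 1).filter (fun j => decide (pvKey forest (i, j) > 1))).map
      (fun j => (i, j)))

-- inserting an element whose place is between l₁ and l₂
lemma insertBy_middle {α : Type} (before : α → α → Bool) (x : α) (l₁ l₂ : List α)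
    (h₁ : ∀ y ∈ l₁, before x y = false) (h₂ : ∀ y ∈ l₂, before x y = true) :
    PySem.List.insertBy before x (l₁ ++ l₂) = l₁ ++ x :: l₂ := by
  induction l₁ with
  | nil =>
    cases l₂ with
    | nil => simp [PySem.List.insertBy]
    | cons y t => simp [PySem.List.insertBy, h₂ y (by simp)]
  | cons y t ih =>
    have hy : before x y = false := h₁ y (by simp)
    simp [PySem.List.insertBy, hy, ih (fun z hz => h₁ z (by simp [hz]))]

-- split a strictly increasing list at a pivot
lemma split_lt (ks : List Int) (hs : ks.Pairwise (· < ·)) (c : Int) :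
    ∃ ks₁ ks₂, ks = ks₁ ++ ks₂ ∧ (∀ k ∈ ks₁, k < c) ∧ (∀ k ∈ ks₂, c ≤ k) := by
  induction ks with
  | nil => exact ⟨[], [], by simp, by simp, by simp⟩
  | cons k t ih =>
    rcases List.pairwise_cons.1 hs with ⟨hk, ht⟩
    by_cases hlt : k < c
    · rcases ih ht with ⟨t₁, t₂, heq, h₁, h₂⟩
      refine ⟨k :: t₁, t₂, by simp [heq], ?_, h₂⟩
      intro z hz
      rcases List.mem_cons.1 hz with h | h
      · omega
      · exact h₁ z h
    · refine ⟨[], k :: t, by simp, by simp, ?_⟩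
      intro z hz
      rcases List.mem_cons.1 hz with h | h
      · omega
      · have := hk z h; omega

lemma ofList_append_mem {c : Int} (xs : List Int) (hc : c ∈ xs) :
    PySem.Set.ofList (xs ++ [c]) = PySem.Set.ofList xs := by
  rw [PySem.Set.ofList_eq_foldl, List.foldl_append, ← PySem.Set.ofList_eq_foldl]
  simp only [List.foldl_cons, List.foldl_nil]
  simp [PySem.Set.add, PySem.Set.contains, hc]

lemma ofList_append_not_mem {c : Int} (xs : List Int) (hc : c ∉ xs) :
    PySem.Set.ofList (xs ++ [c]) = PySem.Set.ofList xs ++ [c] := by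
  rw [PySem.Set.ofList_eq_foldl, List.foldl_append, ← PySem.Set.ofList_eq_foldl]
  simp only [List.foldl_cons, List.foldl_nil]
  simp [PySem.Set.add, PySem.Set.contains, hc]

-- Stable sort = buckets concatenated over the sorted distinct keys.
lemma sorted_groupby {α : Type} (key : α → Int) (l : List α) :
    PySem.List.sorted l key false =
      (PySem.List.sorted (PySem.Set.ofList (l.map key)) (fun x => x) false).flatMap
        (fun k => l.filter (fun y => key y == k)) := by
  induction l using List.reverseRecOn with
  | nil => simp [PySem.List.sorted_eq_foldl_insertBy, PySem.Set.ofList_eq_foldl]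
  | append_singleton l' x ih =>
    have hpair : (PySem.List.sorted (PySem.Set.ofList (l'.map key)) (fun x => x) false).Pairwise (· < ·) :=
      PySem.List.sorted_ofList_pairwise_lt (l'.map key)
    set ks' := PySem.List.sorted (PySem.Set.ofList (l'.map key)) (fun x => x) false with hks'
    have hL : PySem.List.sorted (l' ++ [x]) key false =
        PySem.List.insertBy (fun a b => decide (key a < key b)) x (PySem.List.sorted l' key false) := by
      rw [PySem.List.sorted_eq_foldl_insertBy (l' ++ [x]) key, List.foldl_append,
        ← PySem.List.sorted_eq_foldl_insertBy l' key]
      rfl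
    have hBmem : ∀ (k : Int) (y : α), y ∈ l'.filter (fun z => key z == k) → key y = k := by
      intro k y hy
      simpa using (List.mem_filter.1 hy).2
    have hFmem : ∀ (ks : List Int) (y : α),
        y ∈ ks.flatMap (fun k => l'.filter (fun z => key z == k)) → key y ∈ ks := by
      intro ks y hy
      rcases List.mem_flatMap.1 hy with ⟨k, hk, hyk⟩
      rwa [hBmem k y hyk]
    have hBnew : ∀ k : Int, (l' ++ [x]).filter (fun z => key z == k) =
        l'.filter (fun z => key z == k) ++ if key x == k then [x] else [] := by
      intro k
      rw [List.filter_append]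
      simp [List.filter_cons]
    rw [hL, ih, List.map_append, List.map_singleton]
    obtain ⟨ks₁, ks₂, hsp, h1, h2⟩ := split_lt ks' hpair (key x)
    by_cases hmem : key x ∈ l'.map key
    · rw [ofList_append_mem _ hmem, ← hks']
      have hcks : key x ∈ ks' := by
        rw [hks']
        exact (PySem.List.mem_sorted _ _ _ _).2 ((PySem.Set.mem_ofList _ _).2 hmem)
      have hp2 : ks₂.Pairwise (· < ·) := (List.pairwise_append.1 (hsp ▸ hpair)).2.1
      cases ks₂ with
      | nil =>
        exfalso
        have h' : key x ∈ ks₁ ++ ([] : List Int) := hsp ▸ hcks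
        simp at h'
        exact absurd (h1 _ h') (lt_irrefl _)
      | cons k₀ ks₃ =>
        have hk₀ : k₀ = key x := by
          have hin : key x ∈ k₀ :: ks₃ := by
            have h' : key x ∈ ks₁ ++ k₀ :: ks₃ := hsp ▸ hcks
            rcases List.mem_append.1 h' with h | h
            · exact absurd (h1 _ h) (lt_irrefl _)
            · exact h
          rcases List.mem_cons.1 hin with h | h
          · exact h.symm
          · have hlt := (List.pairwise_cons.1 hp2).1 _ h
            have hle := h2 k₀ (by simp)
            omega
        subst hk₀
        have h3 : ∀ k ∈ ks₃, key x < k := (List.pairwise_cons.1 hp2).1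
        rw [hsp, List.flatMap_append, List.flatMap_cons, List.flatMap_append, List.flatMap_cons]
        have hcong₁ : ks₁.flatMap (fun k => (l' ++ [x]).filter (fun z => key z == k)) =
            ks₁.flatMap (fun k => l'.filter (fun z => key z == k)) := by
          refine List.flatMap_congr (fun k hk => ?_)
          rw [hBnew k]
          have hne : (key x == k) = false := by
            have := h1 k hk
            simp
            omega
          simp [hne]
        have hcong₃ : ks₃.flatMap (fun k => (l' ++ [x]).filter (fun z => key z == k)) =
            ks₃.flatMap (fun k => l'.filter (fun z => key z == k)) := by
          refine List.flatMap_congr (fun k hk => ?_)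
          rw [hBnew k]
          have hne : (key x == k) = false := by
            have := h3 k hk
            simp
            omega
          simp [hne]
        have hc : (l' ++ [x]).filter (fun z => key z == key x) =
            l'.filter (fun z => key z == key x) ++ [x] := by
          rw [hBnew]
          simp
        rw [hcong₁, hcong₃, hc]
        have hno : ∀ y ∈ ks₁.flatMap (fun k => l'.filter (fun z => key z == k)) ++
            l'.filter (fun z => key z == key x), decide (key x < key y) = false := by
          intro y hy
          rcases List.mem_append.1 hy with h | h
          · have hk := h1 _ (hFmem _ _ h)
            exact decide_eq_false (by omega)
          · have hk := hBmem _ _ h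
            exact decide_eq_false (by omega)
        have hyes : ∀ y ∈ ks₃.flatMap (fun k => l'.filter (fun z => key z == k)),
            decide (key x < key y) = true := by
          intro y hy
          have hk := h3 _ (hFmem _ _ hy)
          exact decide_eq_true (by omega)
        rw [← List.append_assoc, insertBy_middle _ x _ _ hno hyes]
        simp
    · rw [ofList_append_not_mem _ hmem]
      have hksnew : PySem.List.sorted (PySem.Set.ofList (l'.map key) ++ [key x]) (fun z => z) false =
          PySem.List.insertBy (fun a b => decide (a < b)) (key x) ks' := by
        rw [PySem.List.sorted_eq_foldl_insertBy, List.foldl_append,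
          ← PySem.List.sorted_eq_foldl_insertBy]
        rfl
      have h2' : ∀ k ∈ ks₂, key x < k := by
        intro k hk
        have hne : k ≠ key x := by
          intro he
          apply hmem
          have hk' : k ∈ ks' := hsp ▸ List.mem_append.2 (Or.inr hk)
          rw [hks'] at hk'
          exact he ▸ (PySem.Set.mem_ofList _ _).1 ((PySem.List.mem_sorted _ _ _ _).1 hk')
        have := h2 k hk
        omega
      have hks2 : PySem.List.insertBy (fun a b => decide (a < b)) (key x) ks' =
          ks₁ ++ key x :: ks₂ := by
        rw [hsp]
        exact insertBy_middle _ _ _ _ (fun y hy => decide_eq_false (by have := h1 y hy; omega))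
          (fun y hy => decide_eq_true (h2' y hy))
      rw [hksnew, hks2, hsp, List.flatMap_append, List.flatMap_append, List.flatMap_cons]
      have hBc : l'.filter (fun z => key z == key x) = [] := by
        refine List.filter_eq_nil_iff.2 (fun y hy => ?_)
        simp
        intro he
        exact hmem (he ▸ List.mem_map_of_mem hy)
      have hcong₁ : ks₁.flatMap (fun k => (l' ++ [x]).filter (fun z => key z == k)) =
          ks₁.flatMap (fun k => l'.filter (fun z => key z == k)) := by
        refine List.flatMap_congr (fun k hk => ?_)
        rw [hBnew k]
        have hne : (key x == k) = false := by
          have := h1 k hk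
          simp
          omega
        simp [hne]
      have hcong₂ : ks₂.flatMap (fun k => (l' ++ [x]).filter (fun z => key z == k)) =
          ks₂.flatMap (fun k => l'.filter (fun z => key z == k)) := by
        refine List.flatMap_congr (fun k hk => ?_)
        rw [hBnew k]
        have hne : (key x == k) = false := by
          have := h2' k hk
          simp
          omega
        simp [hne]
      have hc : (l' ++ [x]).filter (fun z => key z == key x) = [x] := by
        rw [hBnew, hBc]
        simp
      rw [hcong₁, hcong₂, hc]
      have hno : ∀ y ∈ ks₁.flatMap (fun k => l'.filter (fun z => key z == k)),
          decide (key x < key y) = false := by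
        intro y hy
        have hk := h1 _ (hFmem _ _ hy)
        exact decide_eq_false (by omega)
      have hyes : ∀ y ∈ ks₂.flatMap (fun k => l'.filter (fun z => key z == k)),
          decide (key x < key y) = true := by
        intro y hy
        have hk := h2' _ (hFmem _ _ hy)
        exact decide_eq_true (by omega)
      rw [insertBy_middle _ x _ _ hno hyes]
      simp

lemma portA_cells (forest : List (List Int)) (h_ : Int) (w : Int) :
    sort_by_height forest h_ w =
      PySem.List.sorted (pvCells forest h_ w) (pvKey forest) false := by
  simp only [sort_by_height, pvCells, pvKey, PySem.List.foldl_ite_eq_foldl_filter,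
    PySem.List.foldl_append_singleton_eq_map, PySem.List.foldl_append_eq_flatMap,
    List.nil_append]
  rfl

lemma portB_buckets (forest : List (List Int)) (h_ : Int) (w : Int) :
    sort_by_height_alt forest h_ w =
      (PySem.List.sorted (PySem.Set.ofList ((pvCells forest h_ w).map (pvKey forest)))
          (fun x => x) false).flatMap
        (fun k => (pvCells forest h_ w).filter (fun y => pvKey forest y == k)) := by
  simp only [sort_by_height_alt]
  have hb : ((PySem.List.pyRange 0 h_ 1).foldl (fun d i =>
      (PySem.List.pyRange 0 w 1).foldl (fun d j =>
        let v := PySem.List.pyGetD (PySem.List.pyGetD forest i []) j 0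
        if v > 1 then d.modify v [] (fun b => b ++ [(i, j)]) else d) d)
      (PySem.Dict.empty : PySem.Dict Int (List (Int × Int)))) =
      (pvCells forest h_ w).foldl
        (fun d p => d.modify (pvKey forest p) [] (fun b => b ++ [p])) PySem.Dict.empty := by
    rw [pvCells, List.foldl_flatMap]
    simp only [List.foldl_map, PySem.List.foldl_ite_eq_foldl_filter, pvKey]
    rfl
  rw [hb]
  have hkeys : ((pvCells forest h_ w).foldl
      (fun d p => d.modify (pvKey forest p) [] (fun b => b ++ [p]))
      (PySem.Dict.empty : PySem.Dict Int (List (Int × Int)))).keys =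
      PySem.Set.ofList ((pvCells forest h_ w).map (pvKey forest)) := by
    rw [PySem.Dict.keys_foldl_modify_key (pvCells forest h_ w) (pvKey forest) []
      (fun _ p => fun b => b ++ [p]) PySem.Dict.empty]
    rw [PySem.Dict.keys_empty, PySem.Set.ofList_eq_foldl]
    rfl
  have hget : ∀ c : Int, ((pvCells forest h_ w).foldl
      (fun d p => d.modify (pvKey forest p) [] (fun b => b ++ [p]))
      (PySem.Dict.empty : PySem.Dict Int (List (Int × Int)))).getD c [] =
      (pvCells forest h_ w).filter (fun y => pvKey forest y == c) := by
    intro c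
    have hm : (pvCells forest h_ w).foldl
        (fun d p => d.modify (pvKey forest p) [] (fun b => b ++ [p]))
        (PySem.Dict.empty : PySem.Dict Int (List (Int × Int))) =
        ((pvCells forest h_ w).map (fun p => (pvKey forest p, p))).foldl
          (fun d q => d.modify q.1 [] (fun b => b ++ [q.2])) PySem.Dict.empty := by
      rw [List.foldl_map]
    rw [hm, PySem.Dict.getD_foldl_modify_append, PySem.Dict.getD_empty]
    simp [List.filter_map, Function.comp_def, List.map_map]
  rw [hkeys, PySem.List.foldl_append_eq_flatMap, List.nil_append]
  exact List.flatMap_congr (fun k _ => hget k)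

-- ===== VERDICT (by name: the statement is the Claim_ definition above) =====
theorem sort_by_height_spec : Claim_equal_sort_by_height := by
  intro forest h_ w _ _
  unfold Spec_sort_by_height
  rw [portA_cells, portB_buckets, sorted_groupby]
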